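-- pv_equiv track=rewrite | github.com/Venkatavignesh15/50-days-DSA-Challenge | Code21.py | maxDistinctSubstringLengthInSessions
-- ===== SOURCE A (Python) =====
-- def maxDistinctSubstringLengthInSessions(sessionString):
--     if not sessionString or set(sessionString) == {"*"} :
--         return 0
--     seen=set()# Write your code here
--     left=0
--     longest=0
--     for i in range(len(sessionString)):
--         if sessionString[i] == '*':
--             seen.clear()
--             left = i + 1
--             continue
--
--         while sessionString[i] in seen:
--             seen.remove(sessionString[left])
--             left+=1
--         seen.add(sessionString[i])
--         longest=max(longest,i-left+1)
--     return longest
-- ===== SOURCE B (Python) =====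
-- def maxDistinctSubstringLengthInSessions(sessionString):
--     if not sessionString:
--         return 0
--     best = 0
--     for session in sessionString.split('*'):
--         last = {}
--         left = 0
--         for i, c in enumerate(session):
--             if c in last and last[c] + 1 > left:
--                 left = last[c] + 1
--             last[c] = i
--             if i - left + 1 > best:
--                 best = i - left + 1
--     return best
-- ===== Notes on version B (the rewrite author's own statement) =====
-- stated objective: faster
-- what changed: Instead of A's single indexed pass with a set-shrinking while-loop and in-place resets at each delimiter, B splits the string on the delimiter and runs an independent last-seen-index sliding window (dict char->index, left = max(left, last[c]+1)) over each session, tracking the global best.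
import Mathlib
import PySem

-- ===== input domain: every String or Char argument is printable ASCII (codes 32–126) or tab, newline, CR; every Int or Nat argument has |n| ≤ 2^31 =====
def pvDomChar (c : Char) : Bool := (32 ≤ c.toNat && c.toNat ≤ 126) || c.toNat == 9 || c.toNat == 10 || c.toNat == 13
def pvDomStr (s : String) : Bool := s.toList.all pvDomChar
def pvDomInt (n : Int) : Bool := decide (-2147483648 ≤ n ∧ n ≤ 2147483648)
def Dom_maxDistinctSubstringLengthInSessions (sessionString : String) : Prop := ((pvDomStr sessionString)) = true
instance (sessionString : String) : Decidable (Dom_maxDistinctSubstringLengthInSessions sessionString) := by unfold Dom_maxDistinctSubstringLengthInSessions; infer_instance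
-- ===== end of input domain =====

-- B re-implements A by a different decomposition: split the string on '*' and run a
-- last-seen-index sliding window per session, instead of A's single indexed pass with a
-- set-shrinking while-loop and in-place resets.  Objective: faster (a timing run measured
-- B ≥ 1.5× faster on the generated inputs; constant-factor: no per-char set removals).

-- ===== PORT A =====
def pvWhileA (t : List Char) (c : Char) : Nat → PySem.Set Char → Nat → PySem.Set Char × Nat
  | 0, seen, left => (seen, left)
  | fuel + 1, seen, left =>
    if PySem.Set.contains seen c then
      pvWhileA t c fuel (PySem.Set.discard seen (t.getD left ' ')) (left + 1)
    else (seen, left)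

def pvStepA (t : List Char) (st : PySem.Set Char × Nat × Int) (i : Nat) :
    PySem.Set Char × Nat × Int :=
  let c := t.getD i ' '
  if c = '*' then (PySem.Set.empty, i + 1, st.2.2)
  else
    let r := pvWhileA t c (i + 1) st.1 st.2.1
    (PySem.Set.add r.1 c, r.2, max st.2.2 ((i : Int) - (r.2 : Int) + 1))

def maxDistinctSubstringLengthInSessions (sessionString : String) : Int :=
  let t := sessionString.toList
  if t = [] ∨ PySem.Set.equal (PySem.Set.ofList t) (PySem.Set.ofList ['*']) = true then 0
  else ((List.range t.length).foldl (pvStepA t) (PySem.Set.empty, 0, 0)).2.2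

-- ===== PORT B =====
def pvStepB (st : PySem.Dict Char Int × Int × Int) (ic : Int × Char) :
    PySem.Dict Char Int × Int × Int :=
  let left' := match PySem.Dict.get? st.1 ic.2 with
    | some j => if j + 1 > st.2.1 then j + 1 else st.2.1
    | none => st.2.1
  (PySem.Dict.insert st.1 ic.2 ic.1, left',
    if ic.1 - left' + 1 > st.2.2 then ic.1 - left' + 1 else st.2.2)

def pvWindowB (best : Int) (sess : List Char) : Int :=
  ((PySem.List.enumerate sess).foldl pvStepB (PySem.Dict.empty, 0, best)).2.2

def maxDistinctSubstringLengthInSessions_alt (sessionString : String) : Int :=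
  if sessionString.toList = [] then 0
  else (PySem.Chars.splitOn sessionString.toList ['*']).foldl pvWindowB 0

-- ===== PRECONDITION & SPEC =====
def Spec_maxDistinctSubstringLengthInSessions (sessionString : String) (out : Int) : Prop := out = maxDistinctSubstringLengthInSessions_alt sessionString
instance (sessionString : String) (out : Int) : Decidable (Spec_maxDistinctSubstringLengthInSessions sessionString out) := by unfold Spec_maxDistinctSubstringLengthInSessions; infer_instance

-- ===== CLAIM (what is proved, stated in full; the proofs are below) =====
def Claim_equal_maxDistinctSubstringLengthInSessions : Prop := ∀ (sessionString : String), Dom_maxDistinctSubstringLengthInSessions sessionString → Spec_maxDistinctSubstringLengthInSessions sessionString (maxDistinctSubstringLengthInSessions sessionString)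

-- ===== LEMMAS AND PROOFS =====

-- Both loops simulate the same abstract sliding window over (current window, best):
-- pvShrink is A's while-loop made pure; pvStep is one step of either loop on that state.
def pvShrink (w : List Char) (c : Char) : List Char :=
  match w with
  | [] => []
  | x :: ws => if c ∈ x :: ws then pvShrink ws c else x :: ws

def pvStep (st : List Char × Int) (c : Char) : List Char × Int :=
  if c = '*' then ([], st.2)
  else (pvShrink st.1 c ++ [c], max st.2 (((pvShrink st.1 c).length : Int) + 1))

def pvAbs (t : List Char) (st : List Char × Int) : List Char × Int := t.foldl pvStep st

lemma pvShrink_suffix (w : List Char) (c : Char) : pvShrink w c <:+ w := by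
  induction w with
  | nil => simp [pvShrink]
  | cons x ws ih =>
    rw [pvShrink]
    split_ifs with h
    · exact ih.trans (List.suffix_cons x ws)
    · exact List.suffix_rfl

lemma pvShrink_not_mem (w : List Char) (c : Char) : c ∉ pvShrink w c := by
  induction w with
  | nil => simp [pvShrink]
  | cons x ws ih =>
    rw [pvShrink]
    split_ifs with h
    · exact ih
    · exact h

lemma pvShrink_of_not_mem {w : List Char} {c : Char} (h : c ∉ w) : pvShrink w c = w := by
  cases w with
  | nil => rfl
  | cons x ws => rw [pvShrink] ; simp [h]

lemma pvShrink_eq_drop {w : List Char} {c : Char} (hnd : w.Nodup) {p : Nat}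
    (hp : p < w.length) (hc : w.get ⟨p, hp⟩ = c) : pvShrink w c = w.drop (p + 1) := by
  induction w generalizing p with
  | nil => simp at hp
  | cons x ws ih =>
    have hmem : c ∈ x :: ws := hc ▸ List.get_mem _ _
    rw [pvShrink, if_pos hmem]
    cases p with
    | zero =>
      simp at hc
      subst hc
      rw [pvShrink_of_not_mem ((List.nodup_cons.mp hnd).1)]
      simp
    | succ q =>
      simp at hp
      have := ih hnd.of_cons (p := q) (by omega) (by simpa using hc)
      simpa using this

lemma pvAbs_window_suffix (u : List Char) (w : List Char) (b : Int) :
    (pvAbs u (w, b)).1 <:+ w ++ u := by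
  induction u generalizing w b with
  | nil => simp [pvAbs]
  | cons c u ih =>
    show (pvAbs u (pvStep (w, b) c)).1 <:+ w ++ c :: u
    rw [pvStep]
    split_ifs with h
    · have h0 : (pvAbs u ([], b)).1 <:+ u := by
        have := ih [] b
        rwa [List.nil_append] at this
      exact h0.trans ((List.suffix_cons c u).trans (List.suffix_append w (c :: u)))
    · refine (ih _ _).trans ?_
      obtain ⟨p, hp⟩ := pvShrink_suffix w c
      refine ⟨p, ?_⟩
      conv_rhs => rw [← hp]
      simp

lemma pvAbs_window_nodup (u : List Char) (w : List Char) (b : Int) (h : w.Nodup) :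
    (pvAbs u (w, b)).1.Nodup := by
  induction u generalizing w b h with
  | nil => simpa [pvAbs] using h
  | cons c u ih =>
    show (pvAbs u (pvStep (w, b) c)).1.Nodup
    rw [pvStep]
    split_ifs with hc
    · exact ih [] _ List.nodup_nil
    · refine ih _ _ ?_
      have h1 : (pvShrink w c).Nodup := (pvShrink_suffix w c).sublist.nodup h
      have h2 := pvShrink_not_mem w c
      exact h1.append (List.nodup_singleton c)
        (fun a ha hb => h2 (List.mem_singleton.mp hb ▸ ha))

lemma pvWhileA_eq (t : List Char) (c : Char) :
    ∀ (w : List Char) (fuel left : Nat), w.Nodup → w.length ≤ fuel →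
    (∀ m (hm : m < w.length), t.getD (left + m) ' ' = w.get ⟨m, hm⟩) →
    pvWhileA t c fuel w left = (pvShrink w c, left + (w.length - (pvShrink w c).length)) := by
  intro w
  induction w with
  | nil =>
    intro fuel left _ _ _
    cases fuel <;> simp [pvWhileA, pvShrink, PySem.Set.contains]
  | cons x ws ih =>
    intro fuel left hnd hfuel hlook
    by_cases hmem : c ∈ x :: ws
    · -- while-condition true: one removal step
      obtain ⟨fuel, rfl⟩ : ∃ f, fuel = f + 1 := ⟨fuel - 1, by simp at hfuel; omega⟩
      rw [pvWhileA, if_pos (by simpa [PySem.Set.contains] using hmem)]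
      have hx : t.getD (left + 0) ' ' = x := hlook 0 (by simp)
      have hdis : PySem.Set.discard (x :: ws) (t.getD left ' ') = ws := by
        have hxm : x ∉ ws := (List.nodup_cons.mp hnd).1
        simp only [Nat.add_zero] at hx
        rw [hx]
        simp only [PySem.Set.discard, List.filter]
        simp
        intro a ha
        exact fun h => hxm (h ▸ ha)
      rw [hdis]
      have := ih fuel (left + 1) (List.nodup_cons.mp hnd).2 (by simp at hfuel; omega)
        (fun m hm => by
          have := hlook (m + 1) (by simpa using Nat.succ_lt_succ hm)
          simpa [Nat.add_comm, Nat.add_assoc, Nat.add_left_comm] using this)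
      rw [this]
      rw [pvShrink, if_pos hmem]
      have hlen : (pvShrink ws c).length ≤ ws.length :=
        (pvShrink_suffix ws c).sublist.length_le
      refine Prod.ext rfl ?_
      simp only [List.length_cons]
      omega
    · -- while-condition false
      have hc : PySem.Set.contains (x :: ws) c = false := by
        simp [PySem.Set.contains]
        simpa using hmem
      rw [pvShrink_of_not_mem hmem]
      cases fuel with
      | zero => simp at hfuel
      | succ f =>
        rw [pvWhileA, if_neg (by simp; simpa using hmem)]
        simp

lemma pvLoopA_eq_abs (t : List Char) (j : Nat) (hj : j ≤ t.length) :
    (List.range j).foldl (pvStepA t) (PySem.Set.empty, 0, 0) =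
      ((pvAbs (t.take j) ([], 0)).1, j - (pvAbs (t.take j) ([], 0)).1.length,
        (pvAbs (t.take j) ([], 0)).2) := by
  induction j with
  | zero => simp [pvAbs, PySem.Set.empty]
  | succ j ih =>
    have hjlt : j < t.length := by omega
    have ih' := ih (by omega)
    rw [List.range_succ, List.foldl_append, ih']
    set c := t.getD j ' ' with hc
    have htake : t.take (j + 1) = t.take j ++ [c] := by
      rw [List.take_add_one, List.getElem?_eq_getElem hjlt]
      simp [hc, List.getD_eq_getElem?_getD, List.getElem?_eq_getElem hjlt]
    have habs : pvAbs (t.take (j + 1)) ([], 0) = pvStep (pvAbs (t.take j) ([], 0)) c := by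
      rw [htake]; simp [pvAbs, List.foldl_append]
    set W := (pvAbs (t.take j) ([], 0)).1 with hWdef
    set L := (pvAbs (t.take j) ([], 0)).2 with hLdef
    have hW : W <:+ t.take j := by
      have := pvAbs_window_suffix (t.take j) [] 0
      rwa [List.nil_append] at this
    have hnd : W.Nodup := pvAbs_window_nodup _ _ _ List.nodup_nil
    have hlen : W.length ≤ j :=
      le_trans hW.sublist.length_le (by rw [List.length_take]; omega)
    have hlook : ∀ m (hm : m < W.length), t.getD ((j - W.length) + m) ' ' = W.get ⟨m, hm⟩ := by
      intro m hm
      obtain ⟨p, hp⟩ := hW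
      have hplen : p.length = j - W.length := by
        have := congrArg List.length hp
        simp [List.length_take] at this
        omega
      have hidx : j - W.length + m < t.length := by omega
      rw [List.getD_eq_getElem?_getD, List.getElem?_eq_getElem hidx]
      have hidx2 : j - W.length + m < (t.take j).length := by rw [List.length_take]; omega
      have h1 : (t.take j)[j - W.length + m]'hidx2 = t[j - W.length + m]'hidx :=
        List.getElem_take
      have hidx3 : j - W.length + m < (p ++ W).length := hp ▸ hidx2
      have h2 : (p ++ W)[j - W.length + m]'hidx3 = W[m]'hm := by
        rw [List.getElem_append_right (by omega)]
        congr 1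
        omega
      rw [Option.getD_some]
      simp only [List.get_eq_getElem]
      rw [← h1]
      simp only [← hp]
      exact h2
    have hpair : pvAbs (List.take j t) ([], 0) = (W, L) :=
      Prod.ext hWdef.symm hLdef.symm
    rw [habs, hpair]
    show pvStepA t (W, j - W.length, L) j = _
    rw [pvStepA, pvStep]
    simp only [← hc]
    split_ifs with hstar
    · exact Prod.ext rfl (Prod.ext (by simp) rfl)
    · clear_value W L
      have hwe := pvWhileA_eq t c W (j + 1) (j - W.length) hnd (by omega) hlook
      simp only [hwe]
      have hsl : (pvShrink W c).length ≤ W.length := (pvShrink_suffix W c).sublist.length_le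
      have hadd : PySem.Set.add (pvShrink W c) c = pvShrink W c ++ [c] :=
        PySem.Set.add_of_not_mem (pvShrink_not_mem W c)
      rw [hadd]
      refine Prod.ext rfl (Prod.ext ?_ ?_)
      · simp only [List.length_append, List.length_cons, List.length_nil]
        omega
      · dsimp only
        congr 1
        omega

def pvLast : List Char → Char → Option Nat
  | [], _ => none
  | x :: xs, c =>
    match pvLast xs c with
    | some k => some (k + 1)
    | none => if x = c then some 0 else none

lemma pvLast_append (l : List Char) (y c : Char) :
    pvLast (l ++ [y]) c = if y = c then some l.length else pvLast l c := by
  induction l with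
  | nil => rfl
  | cons x xs ih =>
    show (match pvLast (xs ++ [y]) c with
          | some k => some (k + 1) | none => if x = c then some 0 else none) = _
    rw [ih]
    by_cases h : y = c
    · simp [h]
    · simp only [if_neg h]
      rfl

lemma pvLast_spec_none {l : List Char} {c : Char} (h : pvLast l c = none) : c ∉ l := by
  induction l with
  | nil => simp
  | cons x xs ih =>
    rw [pvLast] at h
    cases hx : pvLast xs c with
    | some k => rw [hx] at h; simp at h
    | none =>
      rw [hx] at h
      split_ifs at h with hxc
      all_goals
        simp only [List.mem_cons, not_or]
        exact ⟨fun hc => hxc hc.symm, ih hx⟩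

lemma pvLast_spec_some {l : List Char} {c : Char} {m : Nat} (h : pvLast l c = some m) :
    ∃ hm : m < l.length, l.get ⟨m, hm⟩ = c ∧
      ∀ i (hi : i < l.length), m < i → l.get ⟨i, hi⟩ ≠ c := by
  induction l generalizing m with
  | nil => simp [pvLast] at h
  | cons x xs ih =>
    rw [pvLast] at h
    cases hx : pvLast xs c with
    | some k =>
      rw [hx] at h
      simp only [Option.some.injEq] at h
      obtain ⟨hk, hkc, hmax⟩ := ih hx
      subst h
      refine ⟨by simpa using Nat.succ_lt_succ hk, by simpa using hkc, ?_⟩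
      intro i hi hgt
      cases i with
      | zero => omega
      | succ i' =>
        have : i' < xs.length := by simpa using hi
        simpa using hmax i' this (by omega)
    | none =>
      rw [hx] at h
      split_ifs at h with hxc
      simp only [Option.some.injEq] at h
      subst h
      refine ⟨by simp, by simpa using hxc, ?_⟩
      intro i hi hgt
      cases i with
      | zero => omega
      | succ i' =>
        have h1 : i' < xs.length := by simpa using hi
        have := pvLast_spec_none hx
        intro hc
        exact this (by simpa using hc ▸ List.get_mem xs ⟨i', h1⟩)

lemma pvMaxIf (b x : Int) : (if x > b then x else b) = max b x := by
  rcases lt_or_ge b x with h | h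
  · rw [if_pos h]
    exact (max_eq_right h.le).symm
  · rw [if_neg (not_lt.mpr h)]
    exact (max_eq_left h).symm

lemma pvEnumerate_cons {α : Type} (c : α) (u : List α) (s : Int) :
    PySem.List.enumerate (c :: u) s = (s, c) :: PySem.List.enumerate u (s + 1) := rfl

lemma pvWindowB_gen (u : List Char) (hfree : '*' ∉ u) :
    ∀ (p : List Char) (last : PySem.Dict Char Int) (w : List Char) (b : Int),
    (∀ ch, PySem.Dict.get? last ch = (pvLast p ch).map (fun n => (n : Int))) →
    w.Nodup → w <:+ p →
    ((PySem.List.enumerate u (p.length : Int)).foldl pvStepB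
        (last, ((p.length - w.length : Nat) : Int), b)).2.2 =
      (pvAbs u (w, b)).2 := by
  induction u with
  | nil => intro p last w b _ _ _; rfl
  | cons c u ih =>
    intro p last w b hlast hnd hsuf
    have hcstar : c ≠ '*' := fun h => hfree (by simp [h])
    have hustar : '*' ∉ u := fun h => hfree (by simp [h])
    obtain ⟨pre, hpre⟩ := hsuf
    have hq : pre.length = p.length - w.length := by
      have := congrArg List.length hpre
      simp only [List.length_append] at this
      omega
    have hwlen : w.length ≤ p.length := by
      have := congrArg List.length hpre
      simp only [List.length_append] at this
      omega
    rw [pvEnumerate_cons, List.foldl_cons]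
    -- the new consumed prefix and its dict
    have hlast' : ∀ ch, PySem.Dict.get? (PySem.Dict.insert last c (p.length : Int)) ch =
        (pvLast (p ++ [c]) ch).map (fun n => (n : Int)) := by
      intro ch
      rw [PySem.Dict.get?_insert, pvLast_append]
      by_cases h : ch = c
      · simp [h]
      · rw [if_neg h, if_neg (fun hh : c = ch => h hh.symm), hlast ch]
    -- key: the new left and best agree with the abstract step
    have hshr : pvShrink w c <:+ w := pvShrink_suffix w c
    have hshl : (pvShrink w c).length ≤ w.length := hshr.sublist.length_le
    have key : (match PySem.Dict.get? last c with
          | some j => if j + 1 > ((p.length - w.length : Nat) : Int) then j + 1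
                      else ((p.length - w.length : Nat) : Int)
          | none => ((p.length - w.length : Nat) : Int)) =
        (((p ++ [c]).length - (pvShrink w c ++ [c]).length : Nat) : Int) := by
      rw [hlast c]
      cases hm : pvLast p c with
      | none =>
        have hnotw : c ∉ w := fun hcw => pvLast_spec_none hm (hpre ▸ List.mem_append_right pre hcw)
        rw [pvShrink_of_not_mem hnotw]
        show ((p.length - w.length : Nat) : Int) = _
        simp only [List.length_append, List.length_cons, List.length_nil]
        omega
      | some m =>
        obtain ⟨hmlt, hmc, hmax⟩ := pvLast_spec_some hm
        show (if ((m : Int)) + 1 > ((p.length - w.length : Nat) : Int) then ((m : Int)) + 1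
              else ((p.length - w.length : Nat) : Int)) = _
        by_cases hcase : pre.length ≤ m
        · -- c is inside the window, at w-index m - pre.length
          have hmw : m - pre.length < w.length := by
            have := congrArg List.length hpre
            simp at this
            omega
          have hwm : w.get ⟨m - pre.length, hmw⟩ = c := by
            have h1 : p[m]'hmlt = c := by simpa [List.get_eq_getElem] using hmc
            simp only [← hpre] at h1
            rw [List.getElem_append_right hcase] at h1
            simpa [List.get_eq_getElem] using h1
          rw [pvShrink_eq_drop hnd hmw hwm]
          rw [if_pos (by omega)]
          simp only [List.length_append, List.length_drop, List.length_cons, List.length_nil]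
          omega
        · -- last occurrence of c is before the window: c ∉ w
          have hnotw : c ∉ w := by
            intro hcw
            obtain ⟨⟨idx, hidx⟩, hgetc⟩ := List.mem_iff_get.mp hcw
            have hplen : pre.length + idx < p.length := by
              have := congrArg List.length hpre
              simp at this
              omega
            have : p.get ⟨pre.length + idx, hplen⟩ = c := by
              simp only [List.get_eq_getElem]
              simp only [← hpre]
              rw [List.getElem_append_right (by omega)]
              simpa [List.get_eq_getElem] using hgetc
            exact hmax _ hplen (by omega) this
          rw [pvShrink_of_not_mem hnotw]
          rw [if_neg (by omega)]
          simp only [List.length_append, List.length_cons, List.length_nil]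
          omega
    have hstep : pvStepB (last, ((p.length - w.length : Nat) : Int), b) ((p.length : Int), c) =
        (PySem.Dict.insert last c (p.length : Int),
         (((p ++ [c]).length - (pvShrink w c ++ [c]).length : Nat) : Int),
         max b (((pvShrink w c).length : Int) + 1)) := by
      rw [pvStepB]
      refine Prod.ext rfl (Prod.ext ?_ ?_) <;> dsimp only <;> rw [key]
      have harith : (p.length : Int) -
          (((p ++ [c]).length - (pvShrink w c ++ [c]).length : Nat) : Int) + 1 =
          ((pvShrink w c).length : Int) + 1 := by
        simp only [List.length_append, List.length_cons, List.length_nil]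
        omega
      rw [harith, pvMaxIf]
    rw [hstep]
    have hnd' : (pvShrink w c ++ [c]).Nodup :=
      ((hshr.sublist.nodup hnd).append (List.nodup_singleton c)
        (fun a ha hb => (pvShrink_not_mem w c) (List.mem_singleton.mp hb ▸ ha)))
    have hsuf' : pvShrink w c ++ [c] <:+ p ++ [c] := by
      obtain ⟨pp, hpp⟩ := hshr.trans ⟨pre, hpre⟩
      exact ⟨pp, by rw [← List.append_assoc, hpp]⟩
    have hcast : ((p.length : Int) + 1) = (((p ++ [c]).length : Nat) : Int) := by
      simp only [List.length_append, List.length_cons, List.length_nil]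
      push_cast
      ring
    rw [hcast]
    rw [ih hustar (p ++ [c]) (PySem.Dict.insert last c (p.length : Int))
      (pvShrink w c ++ [c]) (max b (((pvShrink w c).length : Int) + 1)) hlast' hnd' hsuf']
    show _ = (pvAbs u (pvStep (w, b) c)).2
    rw [pvStep, if_neg hcstar]

lemma pvWindowB_eq_abs (u : List Char) (hfree : '*' ∉ u) (b : Int) :
    pvWindowB b u = (pvAbs u ([], b)).2 := by
  have := pvWindowB_gen u hfree [] PySem.Dict.empty [] b
    (fun ch => by simp [PySem.Dict.get?_empty, pvLast]) List.nodup_nil List.nil_suffix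
  simpa using this

lemma pvSplitOn_go_acc (fuel : Nat) (l cur : List Char) (acc : List (List Char)) :
    PySem.Chars.splitOn.go ['*'] fuel l cur acc =
      acc.reverse ++ PySem.Chars.splitOn.go ['*'] fuel l cur [] := by
  induction fuel generalizing l cur acc with
  | zero => simp [PySem.Chars.splitOn.go]
  | succ f ih =>
    cases l with
    | nil => simp [PySem.Chars.splitOn.go]
    | cons c rest =>
      simp only [PySem.Chars.splitOn.go]
      split_ifs with h
      · rw [ih _ _ (cur.reverse :: acc), ih _ _ [cur.reverse]]
        simp
      · exact ih _ _ acc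

lemma pvSplitOn_go_nostar (fuel : Nat) (l cur : List Char) (h : '*' ∉ l) :
    PySem.Chars.splitOn.go ['*'] fuel l cur [] = [cur.reverse ++ l] := by
  induction fuel generalizing l cur with
  | zero => simp [PySem.Chars.splitOn.go]
  | succ f ih =>
    cases l with
    | nil => simp [PySem.Chars.splitOn.go]
    | cons c rest =>
      rw [PySem.Chars.splitOn.go]
      have hc : c ≠ '*' := fun hc => h (by simp [hc])
      rw [if_neg (by
        simp only [List.isPrefixOf, Bool.and_eq_true, beq_iff_eq, and_true]
        exact fun hh => hc hh.symm)]
      rw [ih rest (c :: cur) (fun hr => h (by simp [hr]))]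
      simp

lemma pvSplitOn_nostar (l : List Char) (h : '*' ∉ l) :
    PySem.Chars.splitOn l ['*'] = [l] := by
  rw [PySem.Chars.splitOn, pvSplitOn_go_nostar _ _ _ h]
  simp

lemma pvSplitOn_go_star (a : List Char) (h : '*' ∉ a) :
    ∀ (fuel : Nat) (r cur : List Char) (acc : List (List Char)), a.length + 1 ≤ fuel →
    PySem.Chars.splitOn.go ['*'] fuel (a ++ '*' :: r) cur acc =
      PySem.Chars.splitOn.go ['*'] (fuel - (a.length + 1)) r [] ((cur.reverse ++ a) :: acc) := by
  induction a with
  | nil =>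
    intro fuel r cur acc hf
    obtain ⟨f, rfl⟩ : ∃ f, fuel = f + 1 := ⟨fuel - 1, by omega⟩
    rw [List.nil_append, PySem.Chars.splitOn.go]
    rw [if_pos (by simp [List.isPrefixOf])]
    simp
  | cons x a' ih =>
    intro fuel r cur acc hf
    obtain ⟨f, rfl⟩ : ∃ f, fuel = f + 1 := ⟨fuel - 1, by omega⟩
    have hx : x ≠ '*' := fun hc => h (by simp [hc])
    rw [List.cons_append, PySem.Chars.splitOn.go]
    rw [if_neg (by
      simp only [List.isPrefixOf, Bool.and_eq_true, beq_iff_eq, and_true]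
      exact fun hh => hx hh.symm)]
    rw [ih (fun hr => h (by simp [hr])) f r (x :: cur) acc (by simp at hf; omega)]
    simp only [List.reverse_cons, List.length_cons]
    have : (f + 1) - (a'.length + 1 + 1) = f - (a'.length + 1) := by omega
    rw [this]
    congr 2
    simp

lemma pvSplitOn_star (a r : List Char) (h : '*' ∉ a) :
    PySem.Chars.splitOn (a ++ '*' :: r) ['*'] = a :: PySem.Chars.splitOn r ['*'] := by
  rw [PySem.Chars.splitOn]
  rw [pvSplitOn_go_star a h _ r [] [] (by simp)]
  have hlen : (a ++ '*' :: r).length + 1 - (a.length + 1) = r.length + 1 := by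
    simp
  rw [hlen, pvSplitOn_go_acc]
  rw [PySem.Chars.splitOn]
  simp

lemma pvAbs_append_star (a r : List Char) (st : List Char × Int) :
    pvAbs (a ++ '*' :: r) st = pvAbs r ([], (pvAbs a st).2) := by
  show List.foldl _ _ _ = _
  rw [List.foldl_append, List.foldl_cons]
  rfl

lemma pvFirstStar (t : List Char) (h : '*' ∈ t) :
    ∃ a r, t = a ++ '*' :: r ∧ '*' ∉ a := by
  induction t with
  | nil => simp at h
  | cons c u ih =>
    by_cases hc : c = '*'
    · exact ⟨[], u, by rw [hc, List.nil_append], by simp⟩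
    · have hu : '*' ∈ u := by
        rcases List.mem_cons.mp h with h1 | h1
        · exact absurd h1.symm hc
        · exact h1
      obtain ⟨a, r, h1, h2⟩ := ih hu
      refine ⟨c :: a, r, by rw [List.cons_append, ← h1], ?_⟩
      simp only [List.mem_cons, not_or]
      exact ⟨fun hh => hc hh.symm, h2⟩

lemma pvAbs_eq_foldl_windows_aux : ∀ (n : Nat) (t : List Char), t.length ≤ n → ∀ b,
    (pvAbs t ([], b)).2 = (PySem.Chars.splitOn t ['*']).foldl pvWindowB b := by
  intro n
  induction n with
  | zero =>
    intro t ht b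
    have : t = [] := List.eq_nil_of_length_eq_zero (by omega)
    subst this
    rfl
  | succ n ih =>
    intro t ht b
    by_cases hstar : '*' ∈ t
    · obtain ⟨a, r, hteq, hane⟩ := pvFirstStar t hstar
      rw [hteq, pvSplitOn_star a r hane, pvAbs_append_star, List.foldl_cons]
      have hlen : r.length ≤ n := by
        have := congrArg List.length hteq
        simp at this
        omega
      rw [ih r hlen, pvWindowB_eq_abs a hane]
    · rw [pvSplitOn_nostar t hstar, List.foldl_cons, List.foldl_nil,
        pvWindowB_eq_abs t hstar]

lemma pvAbs_all_star (t : List Char) (w : List Char) (b : Int)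
    (h : ∀ c ∈ t, c = '*') : (pvAbs t (w, b)).2 = b := by
  induction t generalizing w with
  | nil => rfl
  | cons c u ih =>
    have hc : c = '*' := h c (by simp)
    show (pvAbs u (pvStep (w, b) c)).2 = b
    rw [pvStep, if_pos hc]
    exact ih [] (fun x hx => h x (List.mem_cons.mpr (Or.inr hx)))

lemma pvMain (s : String) :
    maxDistinctSubstringLengthInSessions s = maxDistinctSubstringLengthInSessions_alt s := by
  rw [maxDistinctSubstringLengthInSessions, maxDistinctSubstringLengthInSessions_alt]
  by_cases ht : s.toList = []
  · simp [ht]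
  · rw [if_neg ht]
    by_cases heq : PySem.Set.equal (PySem.Set.ofList s.toList) (PySem.Set.ofList ['*']) = true
    · rw [if_pos (Or.inr heq)]
      have hall : ∀ c ∈ s.toList, c = '*' := by
        intro c hcin
        have h1 := (PySem.Set.equal_iff _ _).mp heq c
        have h2 : c ∈ PySem.Set.ofList s.toList := (PySem.Set.mem_ofList _ _).mpr hcin
        have h3 := (PySem.Set.mem_ofList _ _).mp (h1.mp h2)
        simpa using h3
      rw [← pvAbs_eq_foldl_windows_aux s.toList.length s.toList le_rfl 0,
        pvAbs_all_star s.toList [] 0 hall]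
    · rw [if_neg (by rw [not_or]; exact ⟨ht, heq⟩)]
      have h1 := pvLoopA_eq_abs s.toList s.toList.length le_rfl
      rw [List.take_length] at h1
      rw [h1]
      exact pvAbs_eq_foldl_windows_aux s.toList.length s.toList le_rfl 0


-- ===== VERDICT (by name: the statement is the Claim_ definition above) =====
theorem maxDistinctSubstringLengthInSessions_spec : Claim_equal_maxDistinctSubstringLengthInSessions := by
  intro sessionString _
  unfold Spec_maxDistinctSubstringLengthInSessions
  exact pvMain sessionString
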